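-- pv_equiv track=rewrite | github.com/MariaPdg/yandex-training | hw-7B/Python/D-cats.py | count_cats
-- ===== SOURCE A (Python) =====
-- def count_cats(events, segments):
--
--     events.sort()
--     count = 0
--     for event in events:
--         if event[1] == -1:
--             segments[event[2]][2] = count
--         elif event[1] == 1:
--             segments[event[2]][2] = count - segments[event[2]][2]
--         else:
--             count += 1
--     return [elem[2] for elem in segments]
-- ===== SOURCE B (Python) =====
-- def count_cats(events, segments):
--     # Return-value equivalence; like A, mutates: sorts `events`, writes segments[idx][2].
--     events.sort()
--     cats = [(e[0], e[1]) for e in events if e[1] != -1 and e[1] != 1]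
--     for e in events:
--         t = e[1]
--         if t == -1 or t == 1:
--             n = sum(1 for c in cats if c[0] < e[0] or (c[0] == e[0] and c[1] < t))
--             if t == -1:
--                 segments[e[2]][2] = n
--             else:
--                 segments[e[2]][2] = n - segments[e[2]][2]
--     return [elem[2] for elem in segments]
-- ===== Notes on version B (the rewrite author's own statement) =====
-- stated objective: alternative
-- what changed: Replaces A's stateful sweep (a running cat counter threaded through the sorted event loop) by a stateless per-event count: the cat keys (coord, type) are extracted once and each segment boundary's value is computed directly as the number of cat keys lexicographically below the boundary's (coord, type) key, with no accumulator.
import Mathlib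
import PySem

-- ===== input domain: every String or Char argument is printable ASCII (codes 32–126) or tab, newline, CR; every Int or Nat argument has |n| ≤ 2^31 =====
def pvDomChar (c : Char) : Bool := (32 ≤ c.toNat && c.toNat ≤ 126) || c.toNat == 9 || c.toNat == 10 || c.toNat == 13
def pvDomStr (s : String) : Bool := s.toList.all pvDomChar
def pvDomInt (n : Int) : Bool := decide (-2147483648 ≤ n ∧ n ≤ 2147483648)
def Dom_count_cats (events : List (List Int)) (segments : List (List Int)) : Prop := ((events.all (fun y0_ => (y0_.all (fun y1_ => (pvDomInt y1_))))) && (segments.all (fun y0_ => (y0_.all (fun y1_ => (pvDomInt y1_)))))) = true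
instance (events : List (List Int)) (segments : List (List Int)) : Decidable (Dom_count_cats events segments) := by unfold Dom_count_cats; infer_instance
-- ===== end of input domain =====

-- B replaces A's running-counter sweep by a stateless per-event count over the extracted cat keys (alternative
-- decomposition, not faster). Both Pythons mutate their arguments identically (events.sort(), segments[i][2] = …);
-- the equivalence proved here is about the RETURN value.

-- ===== PORT A =====
def count_cats (events : List (List Int)) (segments : List (List Int)) : List Int :=
  let evs := PySem.List.sorted events (fun x => x) false
  let st := evs.foldl (fun (st : Int × List (List Int)) (event : List Int) =>
    let count := st.1
    let segs := st.2
    if PySem.List.pyGetD event 1 0 = -1 then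
      let idx := PySem.List.pyGetD event 2 0
      (count, PySem.List.pySetD segs idx (PySem.List.pySetD (PySem.List.pyGetD segs idx []) 2 count))
    else if PySem.List.pyGetD event 1 0 = 1 then
      let idx := PySem.List.pyGetD event 2 0
      let old := PySem.List.pyGetD (PySem.List.pyGetD segs idx []) 2 0
      (count, PySem.List.pySetD segs idx (PySem.List.pySetD (PySem.List.pyGetD segs idx []) 2 (count - old)))
    else (count + 1, segs)) (0, segments)
  st.2.map (fun elem => PySem.List.pyGetD elem 2 0)

-- ===== PORT B =====
-- c < (e0, t) in Python's tuple order, written out component-wise (as in Source B)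
def pvCatLt (c : Int × Int) (x t : Int) : Bool := c.1 < x || (c.1 = x && c.2 < t)

def count_cats_alt (events : List (List Int)) (segments : List (List Int)) : List Int :=
  let evs := PySem.List.sorted events (fun x => x) false
  let cats := (evs.filter (fun e => !(PySem.List.pyGetD e 1 0 == -1) && !(PySem.List.pyGetD e 1 0 == 1))).map
      (fun e => (PySem.List.pyGetD e 0 0, PySem.List.pyGetD e 1 0))
  let segs := evs.foldl (fun (segs : List (List Int)) (e : List Int) =>
    let t := PySem.List.pyGetD e 1 0
    if t = -1 ∨ t = 1 then
      let n : Int := (cats.countP (fun c => pvCatLt c (PySem.List.pyGetD e 0 0) t) : Nat)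
      let idx := PySem.List.pyGetD e 2 0
      if t = -1 then
        PySem.List.pySetD segs idx (PySem.List.pySetD (PySem.List.pyGetD segs idx []) 2 n)
      else
        PySem.List.pySetD segs idx (PySem.List.pySetD (PySem.List.pyGetD segs idx []) 2
          (n - PySem.List.pyGetD (PySem.List.pyGetD segs idx []) 2 0))
    else segs) segments
  segs.map (fun elem => PySem.List.pyGetD elem 2 0)

-- ===== PRECONDITION & SPEC =====
-- Exactly where the Python A returns: every event long enough for the accesses its type triggers
-- (event[1] always; event[2] plus an in-range segment index when event[1] is -1 or 1), and every
-- segment long enough for the write/read of its slot 2.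
def Pre_count_cats (events : List (List Int)) (segments : List (List Int)) : Prop :=
  (∀ e ∈ events, 2 ≤ e.length ∧
    ((PySem.List.pyGetD e 1 0 = -1 ∨ PySem.List.pyGetD e 1 0 = 1) →
      3 ≤ e.length ∧ PySem.Raise.InRange segments.length (PySem.List.pyGetD e 2 0))) ∧
  (∀ s ∈ segments, 3 ≤ s.length)
instance (events : List (List Int)) (segments : List (List Int)) : Decidable (Pre_count_cats events segments) := by unfold Pre_count_cats; infer_instance

def pvWitness_count_cats : List (List Int) × List (List Int) :=
  ([[1, 0], [0, -1, 0], [2, 1, 0]], [[0, 2, 0]])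

def Spec_count_cats (events : List (List Int)) (segments : List (List Int)) (out : List Int) : Prop := out = count_cats_alt events segments
instance (events : List (List Int)) (segments : List (List Int)) (out : List Int) : Decidable (Spec_count_cats events segments out) := by unfold Spec_count_cats; infer_instance

-- ===== CLAIM (what is proved, stated in full; the proofs are below) =====
def Claim_equal_count_cats : Prop := ∀ (events : List (List Int)) (segments : List (List Int)), Dom_count_cats events segments → Pre_count_cats events segments → Spec_count_cats events segments (count_cats events segments)

-- ===== LEMMAS AND PROOFS =====

-- abbreviations for the fields the two loops read
def pvTy (e : List Int) : Int := PySem.List.pyGetD e 1 0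
def pvC0 (e : List Int) : Int := PySem.List.pyGetD e 0 0
def pvIsCat (e : List Int) : Bool := !(PySem.List.pyGetD e 1 0 == -1) && !(PySem.List.pyGetD e 1 0 == 1)
def pvKey (e : List Int) : Int × Int := (pvC0 e, pvTy e)
def pvCats (L : List (List Int)) : List (Int × Int) := (L.filter pvIsCat).map pvKey

-- the two loop bodies, as named step functions (definitionally the ports' lambdas)
def pvStepA : Int × List (List Int) → List Int → Int × List (List Int) := fun st event =>
  let count := st.1
  let segs := st.2
  if PySem.List.pyGetD event 1 0 = -1 then
    let idx := PySem.List.pyGetD event 2 0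
    (count, PySem.List.pySetD segs idx (PySem.List.pySetD (PySem.List.pyGetD segs idx []) 2 count))
  else if PySem.List.pyGetD event 1 0 = 1 then
    let idx := PySem.List.pyGetD event 2 0
    let old := PySem.List.pyGetD (PySem.List.pyGetD segs idx []) 2 0
    (count, PySem.List.pySetD segs idx (PySem.List.pySetD (PySem.List.pyGetD segs idx []) 2 (count - old)))
  else (count + 1, segs)

def pvStepB (cats : List (Int × Int)) : List (List Int) → List Int → List (List Int) := fun segs e =>
  let t := PySem.List.pyGetD e 1 0
  if t = -1 ∨ t = 1 then
    let n : Int := (cats.countP (fun c => pvCatLt c (PySem.List.pyGetD e 0 0) t) : Nat)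
    let idx := PySem.List.pyGetD e 2 0
    if t = -1 then
      PySem.List.pySetD segs idx (PySem.List.pySetD (PySem.List.pyGetD segs idx []) 2 n)
    else
      PySem.List.pySetD segs idx (PySem.List.pySetD (PySem.List.pyGetD segs idx []) 2
        (n - PySem.List.pyGetD (PySem.List.pyGetD segs idx []) 2 0))
  else segs

lemma pvTy_cons (a b : Int) (xs : List Int) : pvTy (a :: b :: xs) = b := by
  simp [pvTy, PySem.List.pyGetD_ofNat']

lemma pvC0_cons (a b : Int) (xs : List Int) : pvC0 (a :: b :: xs) = a := by
  simp [pvC0, PySem.List.pyGetD_ofNat']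

-- Python's list order restricted to the first two entries (both lists have length ≥ 2, second entries differ)
lemma pvPairLe_of_le (x y : List Int) (hx : 2 ≤ x.length) (hy : 2 ≤ y.length)
    (hle : x ≤ y) (hne : pvTy x ≠ pvTy y) :
    pvC0 x < pvC0 y ∨ (pvC0 x = pvC0 y ∧ pvTy x < pvTy y) := by
  match x, y with
  | a :: b :: xs, c :: d :: ys =>
    rcases lt_or_eq_of_le hle with hlt | heq
    · have h : List.Lex (· < ·) (a :: b :: xs) (c :: d :: ys) := hlt
      cases h with
      | rel h => exact Or.inl (by simpa [pvC0_cons] using h)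
      | cons h =>
        cases h with
        | rel h2 => exact Or.inr ⟨by simp [pvC0_cons], by simpa [pvTy_cons] using h2⟩
        | cons h2 => exact absurd (by simp [pvTy_cons]) hne
    · exact absurd (congrArg pvTy heq) hne

lemma pvIsCat_ty (e : List Int) (h : pvIsCat e = true) : pvTy e ≠ -1 ∧ pvTy e ≠ 1 := by
  simp [pvIsCat] at h
  exact h

-- the central counting identity: at a typed event e, the number of cats strictly before e in the
-- sorted list equals the number of cat keys lexicographically below e's (coord, type) key
lemma pvCountKey (done rest : List (List Int)) (e : List Int)
    (hpw : (done ++ e :: rest).Pairwise (fun a b => a ≤ b))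
    (hlen : ∀ x ∈ done ++ e :: rest, 2 ≤ x.length)
    (he : pvTy e = -1 ∨ pvTy e = 1) :
    (pvCats (done ++ e :: rest)).countP (fun c => pvCatLt c (pvC0 e) (pvTy e))
      = done.countP pvIsCat := by
  have hcatE : pvIsCat e = false := by
    rcases he with h | h <;> simp [pvIsCat, pvTy] at h ⊢ <;> simp [h]
  rw [List.pairwise_append] at hpw
  obtain ⟨-, hpw2, hcross⟩ := hpw
  have hrest : ∀ y ∈ rest, e ≤ y := (List.pairwise_cons.mp hpw2).1
  have hlenE : 2 ≤ e.length := hlen e (by simp)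
  rw [pvCats, List.countP_map, List.countP_filter]
  have hsplit : ∀ (l : List (List Int)),
      List.countP (fun x => ((fun c => pvCatLt c (pvC0 e) (pvTy e)) ∘ pvKey) x && pvIsCat x) l
        = List.countP (fun x => pvCatLt (pvKey x) (pvC0 e) (pvTy e) && pvIsCat x) l := by
    intro l; rfl
  rw [hsplit, List.countP_append, List.countP_cons]
  have hE0 : (pvCatLt (pvKey e) (pvC0 e) (pvTy e) && pvIsCat e) = false := by
    simp [hcatE]
  have hR0 : List.countP (fun x => pvCatLt (pvKey x) (pvC0 e) (pvTy e) && pvIsCat x) rest = 0 := by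
    rw [List.countP_eq_zero]
    intro y hy hq
    simp only [Bool.and_eq_true] at hq
    obtain ⟨hlt, hcat⟩ := hq
    have hne : pvTy e ≠ pvTy y := by
      have := pvIsCat_ty y hcat
      rcases he with h | h <;> rw [h] <;> tauto
    have hord := pvPairLe_of_le e y hlenE (hlen y (by simp [hy])) (hrest y hy) hne
    simp only [pvCatLt, pvKey, Bool.or_eq_true, Bool.and_eq_true, decide_eq_true_eq] at hlt
    rcases hord with h | ⟨h1, h2⟩ <;> rcases hlt with h' | ⟨h1', h2'⟩ <;> omega
  have hD : List.countP (fun x => pvCatLt (pvKey x) (pvC0 e) (pvTy e) && pvIsCat x) done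
      = done.countP pvIsCat := by
    apply List.countP_congr
    intro x hx
    simp only [Bool.and_eq_true]
    constructor
    · exact fun h => h.2
    · intro hcat
      refine ⟨?_, hcat⟩
      have hne : pvTy x ≠ pvTy e := by
        have := pvIsCat_ty x hcat
        rcases he with h | h <;> rw [h] <;> tauto
      have hord := pvPairLe_of_le x e (hlen x (by simp [hx])) hlenE
        (hcross x hx e (by simp)) hne
      simp only [pvCatLt, pvKey, Bool.or_eq_true, Bool.and_eq_true, decide_eq_true_eq]
      rcases hord with h | ⟨h1, h2⟩
      · exact Or.inl h
      · exact Or.inr ⟨h1, h2⟩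
  rw [hE0, hR0, hD]
  simp

lemma pv_sorted_pairwise (events : List (List Int)) :
    List.Pairwise (fun a b : List Int => a ≤ b) (PySem.List.sorted events (fun x => x) false) := by
  have h := PySem.List.sorted_pairwise events (fun x : List Int => x)
  convert h using 2

-- the two folds agree step by step
lemma pvLoop (L : List (List Int)) (hpw : L.Pairwise (fun a b => a ≤ b))
    (hlen : ∀ x ∈ L, 2 ≤ x.length) :
    ∀ (rest done : List (List Int)) (segs : List (List Int)), L = done ++ rest →
    (rest.foldl pvStepA (((done.countP pvIsCat : Nat) : Int), segs)).2
      = rest.foldl (pvStepB (pvCats L)) segs := by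
  intro rest
  induction rest with
  | nil => intro done segs hdec; rfl
  | cons e rest ih =>
    intro done segs hdec
    have hdec' : L = (done ++ [e]) ++ rest := by simp [hdec]
    by_cases h1 : PySem.List.pyGetD e 1 0 = -1
    · -- start event: both write the cat count before e
      have hcat0 : pvIsCat e = false := by simp [pvIsCat, h1]
      have hcnt : (pvCats L).countP
            (fun c => pvCatLt c (PySem.List.pyGetD e 0 0) (PySem.List.pyGetD e 1 0))
          = done.countP pvIsCat := by
        rw [hdec] at hpw hlen ⊢
        exact pvCountKey done rest e hpw hlen (Or.inl h1)
      have hkeep : (done ++ [e]).countP pvIsCat = done.countP pvIsCat := by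
        simp [List.countP_append, hcat0]
      have hA : pvStepA (((done.countP pvIsCat : Nat) : Int), segs) e
          = ((((done ++ [e]).countP pvIsCat : Nat) : Int),
             PySem.List.pySetD segs (PySem.List.pyGetD e 2 0)
               (PySem.List.pySetD (PySem.List.pyGetD segs (PySem.List.pyGetD e 2 0) []) 2
                 (((done.countP pvIsCat : Nat) : Int)))) := by
        simp only [pvStepA]
        rw [if_pos h1, hkeep]
      have hB : pvStepB (pvCats L) segs e
          = PySem.List.pySetD segs (PySem.List.pyGetD e 2 0)
              (PySem.List.pySetD (PySem.List.pyGetD segs (PySem.List.pyGetD e 2 0) []) 2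
                (((done.countP pvIsCat : Nat) : Int))) := by
        simp only [pvStepB]
        rw [if_pos (Or.inl h1), if_pos h1, hcnt]
      rw [List.foldl_cons, List.foldl_cons, hA, hB]
      exact ih (done ++ [e]) _ hdec'
    · by_cases h2 : PySem.List.pyGetD e 1 0 = 1
      · -- end event: both write count − current slot value
        have hcat0 : pvIsCat e = false := by simp [pvIsCat, h2]
        have hcnt : (pvCats L).countP
              (fun c => pvCatLt c (PySem.List.pyGetD e 0 0) (PySem.List.pyGetD e 1 0))
            = done.countP pvIsCat := by
          rw [hdec] at hpw hlen ⊢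
          exact pvCountKey done rest e hpw hlen (Or.inr h2)
        have hkeep : (done ++ [e]).countP pvIsCat = done.countP pvIsCat := by
          simp [List.countP_append, hcat0]
        have hA : pvStepA (((done.countP pvIsCat : Nat) : Int), segs) e
            = ((((done ++ [e]).countP pvIsCat : Nat) : Int),
               PySem.List.pySetD segs (PySem.List.pyGetD e 2 0)
                 (PySem.List.pySetD (PySem.List.pyGetD segs (PySem.List.pyGetD e 2 0) []) 2
                   (((done.countP pvIsCat : Nat) : Int)
                     - PySem.List.pyGetD (PySem.List.pyGetD segs (PySem.List.pyGetD e 2 0) []) 2 0))) := by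
          simp only [pvStepA]
          rw [if_neg h1, if_pos h2, hkeep]
        have hB : pvStepB (pvCats L) segs e
            = PySem.List.pySetD segs (PySem.List.pyGetD e 2 0)
                (PySem.List.pySetD (PySem.List.pyGetD segs (PySem.List.pyGetD e 2 0) []) 2
                  (((done.countP pvIsCat : Nat) : Int)
                    - PySem.List.pyGetD (PySem.List.pyGetD segs (PySem.List.pyGetD e 2 0) []) 2 0)) := by
          simp only [pvStepB]
          rw [if_pos (Or.inr h2), if_neg h1, hcnt]
        rw [List.foldl_cons, List.foldl_cons, hA, hB]
        exact ih (done ++ [e]) _ hdec'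
      · -- cat event: A bumps the counter, B does nothing
        have hcat : pvIsCat e = true := by simp [pvIsCat, h1, h2]
        have hbump : (done ++ [e]).countP pvIsCat = done.countP pvIsCat + 1 := by
          simp [List.countP_append, hcat]
        have hA : pvStepA (((done.countP pvIsCat : Nat) : Int), segs) e
            = ((((done ++ [e]).countP pvIsCat : Nat) : Int), segs) := by
          simp only [pvStepA]
          rw [if_neg h1, if_neg h2, hbump]
          push_cast
          rfl
        have hB : pvStepB (pvCats L) segs e = segs := by
          simp only [pvStepB]
          rw [if_neg (by tauto)]
        rw [List.foldl_cons, List.foldl_cons, hA, hB]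
        exact ih (done ++ [e]) segs hdec'

-- ===== VERDICT (by name: the statement is the Claim_ definition above) =====
theorem count_cats_spec : Claim_equal_count_cats := by
  intro events segments _hdom hpre
  have hloop := pvLoop (PySem.List.sorted events (fun x => x) false)
    (pv_sorted_pairwise events)
    (fun x hx => (hpre.1 x ((PySem.List.mem_sorted events (fun x => x) false x).mp hx)).1)
    (PySem.List.sorted events (fun x => x) false) [] segments (by simp)
  simp only [List.countP_nil, Nat.cast_zero] at hloop
  exact congrArg (List.map (fun elem => PySem.List.pyGetD elem 2 0)) hloop
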